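-- pv_equiv track=rewrite | github.com/Guilhem-Bonnet/Grimoire-kit | framework/tools/dream.py | _parse_shared_context_sections
-- ===== SOURCE A (Python) =====
-- def _parse_shared_context_sections(content: str) -> list[str]:
--     """Extrait les sections non-vides du shared-context."""
--     sections: list[str] = []
--     current = ""
--     for line in content.splitlines():
--         if line.startswith("## "):
--             if current.strip():
--                 sections.append(current.strip())
--             current = line + "\n"
--         else:
--             current += line + "\n"
--     if current.strip():
--         sections.append(current.strip())
--     return sections
-- ===== SOURCE B (Python) =====
-- def _parse_shared_context_sections(content: str) -> list[str]:
--     """Extrait les sections non-vides du shared-context.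
--
--     Different decomposition: first split the line list into header-delimited
--     groups by recursion (each group = one line plus the following non-header
--     lines), then render each group with '\n'.join + strip and keep the
--     non-empty ones.  No running string accumulator.
--     """
--     def groups(lines):
--         if not lines:
--             return []
--         k = 1
--         while k < len(lines) and not lines[k].startswith("## "):
--             k += 1
--         return [lines[:k]] + groups(lines[k:])
--
--     sections: list[str] = []
--     for g in groups(content.splitlines()):
--         text = "\n".join(g).strip()
--         if text:
--             sections.append(text)
--     return sections
-- ===== Notes on version B (the rewrite author's own statement) =====
-- stated objective: alternative
-- what changed: Replaces A's single pass with a running string accumulator and flush-on-header logic by a recursive split of the line list into header-delimited groups, each group then rendered independently with a newline join plus strip and kept if non-empty.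
import Mathlib
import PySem

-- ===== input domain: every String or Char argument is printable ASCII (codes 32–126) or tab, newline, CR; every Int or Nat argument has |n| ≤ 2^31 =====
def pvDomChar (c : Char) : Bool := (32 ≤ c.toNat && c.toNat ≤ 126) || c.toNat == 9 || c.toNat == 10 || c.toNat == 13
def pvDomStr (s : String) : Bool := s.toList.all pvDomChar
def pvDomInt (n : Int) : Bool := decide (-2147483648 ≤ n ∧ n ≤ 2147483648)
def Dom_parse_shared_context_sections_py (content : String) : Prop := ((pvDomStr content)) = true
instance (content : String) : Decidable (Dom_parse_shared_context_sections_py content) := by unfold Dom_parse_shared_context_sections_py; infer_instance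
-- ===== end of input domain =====

-- B replaces A's running string accumulator by a recursive split of the line list into
-- header-delimited groups followed by a join/strip pass (objective: alternative decomposition).


-- ===== PORT A =====
-- literal transliteration of A: a fold over splitlines carrying (sections, current)
def parse_shared_context_sections_py (content : String) : List String :=
  let st := (PySem.Str.splitlines content).foldl
    (fun (st : List String × String) line =>
      if PySem.Str.startswith line "## " then
        ((if PySem.Str.strip st.2 ≠ "" then st.1 ++ [PySem.Str.strip st.2] else st.1),
         line ++ "\n")
      else
        (st.1, st.2 ++ line ++ "\n"))
    ([], "")
  if PySem.Str.strip st.2 ≠ "" then st.1 ++ [PySem.Str.strip st.2] else st.1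

-- ===== PORT B =====
def altNotHeader (s : String) : Bool := !PySem.Str.startswith s "## "

-- Source B's `groups`: the while loop computes k = 1 + length of the non-header prefix of
-- lines[1:], so lines[:k] is lines[0] :: takeWhile and lines[k:] is dropWhile — exact.
def altGroups : List String → List (List String)
  | [] => []
  | l :: rest =>
      (l :: rest.takeWhile altNotHeader) :: altGroups (rest.dropWhile altNotHeader)
  termination_by ls => ls.length
  decreasing_by
    simpa using Nat.lt_succ_of_le (List.length_dropWhile_le altNotHeader rest)

def parse_shared_context_sections_py_alt (content : String) : List String :=
  (altGroups (PySem.Str.splitlines content)).foldl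
    (fun out g =>
      let text := PySem.Str.strip (PySem.Str.join "\n" g)
      if text ≠ "" then out ++ [text] else out) []

-- ===== PRECONDITION & SPEC =====
def Spec_parse_shared_context_sections_py (content : String) (out : List String) : Prop := out = parse_shared_context_sections_py_alt content
instance (content : String) (out : List String) : Decidable (Spec_parse_shared_context_sections_py content out) := by unfold Spec_parse_shared_context_sections_py; infer_instance

-- ===== CLAIM (what is proved, stated in full; the proofs are below) =====
def Claim_equal_parse_shared_context_sections_py : Prop := ∀ (content : String), Dom_parse_shared_context_sections_py content → Spec_parse_shared_context_sections_py content (parse_shared_context_sections_py content)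

-- ===== LEMMAS AND PROOFS =====

-- A's loop written as structural recursion over the line list (acc = sections, c = current)
def loopA : List String → List String → String → List String
  | [], acc, c => if PySem.Str.strip c ≠ "" then acc ++ [PySem.Str.strip c] else acc
  | l :: rest, acc, c =>
      if PySem.Str.startswith l "## " then
        loopA rest (if PySem.Str.strip c ≠ "" then acc ++ [PySem.Str.strip c] else acc) (l ++ "\n")
      else
        loopA rest acc (c ++ l ++ "\n")

-- the concatenation A's `current` performs over a group of lines
def concatNL (c : String) (g : List String) : String :=
  g.foldl (fun s l => s ++ l ++ "\n") c

-- B's emission step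
def emitStep (out : List String) (g : List String) : List String :=
  if PySem.Str.strip (PySem.Str.join "\n" g) ≠ "" then
    out ++ [PySem.Str.strip (PySem.Str.join "\n" g)] else out

-- A's grouping: the pending lines `pref` of the current group, then the rest
def mygroups : List String → List String → List (List String)
  | pref, [] => [pref]
  | pref, l :: rest =>
      if PySem.Str.startswith l "## " then pref :: mygroups [l] rest
      else mygroups (pref ++ [l]) rest

theorem foldA_eq_loopA (lines : List String) (acc : List String) (c : String) :
    (let st := lines.foldl
      (fun (st : List String × String) line =>
        if PySem.Str.startswith line "## " then
          ((if PySem.Str.strip st.2 ≠ "" then st.1 ++ [PySem.Str.strip st.2] else st.1),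
           line ++ "\n")
        else
          (st.1, st.2 ++ line ++ "\n"))
      (acc, c)
     if PySem.Str.strip st.2 ≠ "" then st.1 ++ [PySem.Str.strip st.2] else st.1)
    = loopA lines acc c := by
  induction lines generalizing acc c with
  | nil => simp [loopA]
  | cons l rest ih =>
    simp only [List.foldl_cons, loopA]
    by_cases h : PySem.Str.startswith l "## " = true
    · simp only [h, if_pos]; exact ih _ _
    · simp only [h]; simpa using ih acc (c ++ l ++ "\n")

theorem toList_concatNL (g : List String) (c : String) :
    (concatNL c g).toList
      = c.toList ++ (g.map (fun l => l.toList ++ ['\n'])).flatten := by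
  induction g generalizing c with
  | nil => simp [concatNL]
  | cons l t ih =>
    simp only [concatNL, List.foldl_cons, List.map_cons, List.flatten_cons]
    rw [show (List.foldl (fun s l => s ++ l ++ "\n") (c ++ l ++ "\n") t) = concatNL (c ++ l ++ "\n") t from rfl,
        ih]
    simp [String.toList_append]

theorem flatten_map_nl (g : List (List Char)) (h : g ≠ []) :
    (g.map (· ++ ['\n'])).flatten = PySem.Chars.join ['\n'] g ++ ['\n'] := by
  induction g with
  | nil => exact absurd rfl h
  | cons x t ih =>
    cases t with
    | nil => simp [PySem.Chars.join, List.intercalate]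
    | cons y t' =>
      rw [List.map_cons, List.flatten_cons, ih (by simp), PySem.Chars.join_cons_cons]
      simp

theorem strip_append_nl (cs : List Char) :
    PySem.Chars.strip (cs ++ ['\n']) = PySem.Chars.strip cs := by
  simp only [PySem.Chars.strip, PySem.Chars.lstrip, PySem.Chars.rstrip]
  rw [List.dropWhile_append]
  have hsp : PySem.Chars.isspace '\n' = true := by decide
  by_cases h : (List.dropWhile PySem.Chars.isspace cs).isEmpty = true
  · simp only [h, if_pos]
    simp only [List.isEmpty_iff] at h
    simp [h, hsp]
  · simp only [h, if_neg, Bool.false_eq_true, not_false_iff]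
    simp [hsp]

theorem strip_concatNL_eq (g : List String) :
    PySem.Str.strip (concatNL "" g) = PySem.Str.strip (PySem.Str.join "\n" g) := by
  simp only [PySem.Str.strip, PySem.Str.join]
  cases g with
  | nil => simp [concatNL, PySem.Chars.join, List.intercalate]
  | cons x t =>
    have h1 := toList_concatNL (x :: t) ""
    have h2 : ((x :: t).map (fun l => l.toList ++ ['\n']))
        = ((x :: t).map String.toList).map (· ++ ['\n']) := by simp
    rw [h1, h2, flatten_map_nl _ (by simp)]
    have : ("" : String).toList = [] := rfl
    rw [this, List.nil_append, String.toList_ofList]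
    congr 1
    have hn : ("\n" : String).toList = ['\n'] := rfl
    rw [hn]
    exact strip_append_nl _

set_option maxHeartbeats 1000000 in
theorem loopA_eq_emit (lines : List String) (acc : List String) (pref : List String) :
    loopA lines acc (concatNL "" pref) = (mygroups pref lines).foldl emitStep acc := by
  induction lines generalizing acc pref with
  | nil =>
    simp only [loopA, mygroups, List.foldl_cons, List.foldl_nil, emitStep,
      strip_concatNL_eq pref]
  | cons l rest ih =>
    simp only [loopA, mygroups]
    by_cases h : PySem.Str.startswith l "## " = true
    · simp only [h, if_pos, List.foldl_cons]
      have hl : concatNL "" [l] = l ++ "\n" := by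
        simp only [concatNL, List.foldl_cons, List.foldl_nil, String.empty_append]
      rw [← hl, ih]
      congr 1
      simp only [emitStep, strip_concatNL_eq pref]
    · simp only [h, Bool.false_eq_true, if_neg, not_false_iff]
      have hc : concatNL "" (pref ++ [l]) = concatNL "" pref ++ l ++ "\n" := by
        simp only [concatNL, List.foldl_append, List.foldl_cons, List.foldl_nil]
      rw [← hc, ih]

theorem mygroups_eq (lines : List String) (pref : List String) :
    mygroups pref lines
      = (pref ++ lines.takeWhile altNotHeader) :: altGroups (lines.dropWhile altNotHeader) := by
  induction lines generalizing pref with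
  | nil => simp [mygroups, altGroups]
  | cons l rest ih =>
    simp only [mygroups]
    by_cases h : PySem.Str.startswith l "## " = true
    · have hn : altNotHeader l = false := by
        simp only [altNotHeader, h, Bool.not_true]
      rw [if_pos h, List.takeWhile_cons, List.dropWhile_cons, hn]
      simp only [Bool.false_eq_true, if_neg, not_false_iff, List.append_nil]
      rw [altGroups, ih]
      simp
    · have hn : altNotHeader l = true := by
        simp only [altNotHeader, Bool.not_eq_true']
        exact Bool.not_eq_true _ ▸ (by simpa using h)
      rw [if_neg h, List.takeWhile_cons, List.dropWhile_cons, hn, ih]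
      simp

theorem emit_empty_group (acc : List String) : emitStep acc [] = acc := by
  simp [emitStep, PySem.Str.strip, PySem.Str.join, PySem.Chars.join, PySem.Chars.strip,
    PySem.Chars.lstrip, PySem.Chars.rstrip, List.intercalate]

-- ===== VERDICT (by name: the statement is the Claim_ definition above) =====
theorem parse_shared_context_sections_py_spec : Claim_equal_parse_shared_context_sections_py := by
  intro content _
  unfold Spec_parse_shared_context_sections_py
  unfold parse_shared_context_sections_py parse_shared_context_sections_py_alt
  rw [foldA_eq_loopA]
  have h0 : ("" : String) = concatNL "" [] := rfl
  rw [h0, loopA_eq_emit, mygroups_eq]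
  cases hls : PySem.Str.splitlines content with
  | nil => simp [altGroups, emit_empty_group]
  | cons l rest =>
    by_cases h : altNotHeader l = true
    · rw [List.takeWhile_cons, List.dropWhile_cons, h]
      simp only [if_pos, List.nil_append]
      rw [altGroups]
      rfl
    · have h' : altNotHeader l = false := by simpa using h
      rw [List.takeWhile_cons, List.dropWhile_cons, h']
      simp only [Bool.false_eq_true, if_neg, not_false_iff, List.append_nil]
      rw [show ∀ gs, List.foldl emitStep [] ([] :: gs) = List.foldl emitStep [] gs from
        fun gs => by rw [List.foldl_cons, emit_empty_group]]
      rfl
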